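-- pv_equiv track=rewrite | github.com/KorryKatti/advent-of-code | 2024/day22/opt.py | generate_sequences_and_prices
-- ===== SOURCE A (Python) =====
-- def process_secret(number):
--     number = mix_and_prune(number, number * 64)
--     number = mix_and_prune(number, number // 32)
--     number = mix_and_prune(number, number * 2048)
--     return number
--
-- def mix_and_prune(secret, value):
--     return (secret ^ value) % 16777216
--
-- def generate_sequences_and_prices(initial_secret, count):
--     current = initial_secret
--     prices = [current % 10]
--     for _ in range(count):
--         current = process_secret(current)
--         prices.append(current % 10)
--     changes = [prices[i] - prices[i-1] for i in range(1, len(prices))]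
--     sequences = {}
--     for i in range(len(changes) - 3):
--         seq = tuple(changes[i:i+4])
--         if seq not in sequences:
--             sequences[seq] = prices[i+4]
--     return sequences
-- ===== SOURCE B (Python) =====
-- def process_secret(number):
--     number = mix_and_prune(number, number * 64)
--     number = mix_and_prune(number, number // 32)
--     number = mix_and_prune(number, number * 2048)
--     return number
--
-- def mix_and_prune(secret, value):
--     return (secret ^ value) % 16777216
--
-- def generate_sequences_and_prices(initial_secret, count):
--     # one streaming pass: rolling window of the last 4 changes, no prices/changes lists
--     current = initial_secret
--     prev = current % 10
--     window = []
--     sequences = {}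
--     for _ in range(count):
--         current = process_secret(current)
--         price = current % 10
--         change = price - prev
--         window.append(change)
--         if len(window) > 4:
--             window.pop(0)
--         if len(window) == 4:
--             seq = tuple(window)
--             if seq not in sequences:
--                 sequences[seq] = price
--         prev = price
--     return sequences
-- ===== Notes on version B (the rewrite author's own statement) =====
-- stated objective: simpler
-- what changed: B replaces A's three sequential passes (build the full prices list, build the full changes list, then an indexed dict-building loop with slicing) by a single streaming loop that keeps only the previous price and a rolling window of the last four changes.
import Mathlib
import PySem

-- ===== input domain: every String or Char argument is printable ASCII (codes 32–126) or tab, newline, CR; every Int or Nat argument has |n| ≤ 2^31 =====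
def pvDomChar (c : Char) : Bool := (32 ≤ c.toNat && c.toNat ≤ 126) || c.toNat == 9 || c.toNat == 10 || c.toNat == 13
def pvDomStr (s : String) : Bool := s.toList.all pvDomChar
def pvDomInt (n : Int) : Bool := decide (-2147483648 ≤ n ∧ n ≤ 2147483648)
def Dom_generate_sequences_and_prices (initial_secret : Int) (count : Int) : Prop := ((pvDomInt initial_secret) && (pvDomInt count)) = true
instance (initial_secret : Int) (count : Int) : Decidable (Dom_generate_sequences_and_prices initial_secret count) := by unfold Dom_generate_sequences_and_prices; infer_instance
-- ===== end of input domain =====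

-- B replaces A's three full passes (prices list, changes list, indexed dict loop) by one
-- streaming loop with a rolling window of the last four changes (objective: simpler).

-- ===== PORT A =====
def mix_and_prune (secret : Int) (value : Int) : Int :=
  PySem.Int.mod (PySem.Int.bxor secret value) 16777216

def process_secret (number : Int) : Int :=
  let n1 := mix_and_prune number (number * 64)
  let n2 := mix_and_prune n1 (PySem.Int.floordiv n1 32)
  mix_and_prune n2 (n2 * 2048)

def generate_sequences_and_prices (initial_secret : Int) (count : Int) : List (List Int × Int) :=
  let st := (PySem.List.pyRange 0 count 1).foldl
    (fun (st : Int × List Int) _ =>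
      let c := process_secret st.1
      (c, st.2 ++ [PySem.Int.mod c 10]))
    (initial_secret, [PySem.Int.mod initial_secret 10])
  let prices := st.2
  let changes := (PySem.List.pyRange 1 (PySem.List.len prices) 1).map
    (fun i => PySem.List.pyGetD prices i 0 - PySem.List.pyGetD prices (i - 1) 0)
  let sequences := (PySem.List.pyRange 0 (PySem.List.len changes - 3) 1).foldl
    (fun (d : PySem.Dict (List Int) Int) i =>
      let seq := PySem.List.slice changes (some i) (some (i + 4))
      if d.contains seq then d
      else d.insert seq (PySem.List.pyGetD prices (i + 4) 0))
    PySem.Dict.empty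
  sequences.items

-- ===== PORT B =====
def generate_sequences_and_prices_alt (initial_secret : Int) (count : Int) : List (List Int × Int) :=
  let st := (PySem.List.pyRange 0 count 1).foldl
    (fun (st : Int × Int × List Int × PySem.Dict (List Int) Int) _ =>
      let current := process_secret st.1
      let price := PySem.Int.mod current 10
      let change := price - st.2.1
      let window := st.2.2.1 ++ [change]
      -- window.pop(0) on a list of length > 4 (hence nonempty): drops the head, i.e. tail (exact)
      let window := if 4 < window.length then window.tail else window
      let d := st.2.2.2
      let d := if window.length == 4 then
                 (if d.contains window then d else d.insert window price)
               else d
      (current, price, window, d))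
    (initial_secret, PySem.Int.mod initial_secret 10, [], PySem.Dict.empty)
  st.2.2.2.items

-- ===== PRECONDITION & SPEC =====
def Spec_generate_sequences_and_prices (initial_secret : Int) (count : Int) (out : List (List Int × Int)) : Prop := out = generate_sequences_and_prices_alt initial_secret count
instance (initial_secret : Int) (count : Int) (out : List (List Int × Int)) : Decidable (Spec_generate_sequences_and_prices initial_secret count out) := by unfold Spec_generate_sequences_and_prices; infer_instance

-- ===== CLAIM (what is proved, stated in full; the proofs are below) =====
def Claim_equal_generate_sequences_and_prices : Prop := ∀ (initial_secret : Int) (count : Int), Dom_generate_sequences_and_prices initial_secret count → Spec_generate_sequences_and_prices initial_secret count (generate_sequences_and_prices initial_secret count)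

-- ===== LEMMAS AND PROOFS =====

-- k-th secret / price / change of the stream, and the common dictionary both programs build
def secN (s : Int) : Nat → Int
  | 0 => s
  | n + 1 => process_secret (secN s n)

def prN (s : Int) (k : Nat) : Int := PySem.Int.mod (secN s k) 10

def chg (s : Int) (i : Nat) : Int := prN s (i + 1) - prN s i

def seq4 (s : Int) (i : Nat) : List Int := [chg s i, chg s (i + 1), chg s (i + 2), chg s (i + 3)]

def dstep (s : Int) (d : PySem.Dict (List Int) Int) (i : Nat) : PySem.Dict (List Int) Int :=
  if d.contains (seq4 s i) then d else d.insert (seq4 s i) (prN s (i + 4))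

def dA (s : Int) (n : Nat) : PySem.Dict (List Int) Int :=
  (List.range (n - 3)).foldl (dstep s) PySem.Dict.empty

-- B's rolling window after n iterations
def wN (s : Int) : Nat → List Int
  | 0 => []
  | n + 1 =>
    let w := wN s n ++ [chg s n]
    if 4 < w.length then w.tail else w

theorem foldl_ignore {α β : Type} (g : α → β → α) (f : α → α)
    (h : ∀ a b, g a b = f a) (l : List β) (i : α) :
    l.foldl g i = f^[l.length] i := by
  induction l generalizing i with
  | nil => rfl
  | cons x xs ih => simp [List.foldl_cons, h, ih, Function.iterate_succ_apply]

theorem wN_length (s : Int) (n : Nat) : (wN s n).length = min n 4 := by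
  induction n with
  | zero => simp [wN]
  | succ n ih =>
    simp only [wN]
    split_ifs with h
    · simp_all; omega
    · simp_all; omega

theorem wN_eq_seq4 (s : Int) (m : Nat) : wN s (m + 4) = seq4 s m := by
  induction m with
  | zero => rfl
  | succ m ih =>
    have h : wN s (m + 1 + 4) =
        (if 4 < (wN s (m + 4) ++ [chg s (m + 4)]).length
         then (wN s (m + 4) ++ [chg s (m + 4)]).tail
         else wN s (m + 4) ++ [chg s (m + 4)]) := rfl
    rw [h, ih]
    simp [seq4]

theorem dA_succ (s : Int) (n : Nat) (h : 3 ≤ n) :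
    dA s (n + 1) = dstep s (dA s n) (n - 3) := by
  have : n + 1 - 3 = (n - 3) + 1 := by omega
  simp [dA, this, List.range_succ]

theorem dA_succ_small (s : Int) (n : Nat) (h : n ≤ 2) : dA s (n + 1) = dA s n := by
  have h1 : n + 1 - 3 = 0 := by omega
  have h2 : n - 3 = 0 := by omega
  simp [dA, h1, h2]

-- the streaming step of port B
def gstep (st : Int × Int × List Int × PySem.Dict (List Int) Int) :
    Int × Int × List Int × PySem.Dict (List Int) Int :=
  let current := process_secret st.1
  let price := PySem.Int.mod current 10
  let change := price - st.2.1
  let window := st.2.2.1 ++ [change]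
  let window := if 4 < window.length then window.tail else window
  let d := st.2.2.2
  let d := if window.length == 4 then
             (if d.contains window then d else d.insert window price)
           else d
  (current, price, window, d)

theorem gstep_iterate (s : Int) (n : Nat) :
    gstep^[n] (s, PySem.Int.mod s 10, [], PySem.Dict.empty)
      = (secN s n, prN s n, wN s n, dA s n) := by
  induction n with
  | zero => simp [secN, prN, wN, dA]
  | succ n ih =>
    rw [Function.iterate_succ_apply', ih]
    show (secN s (n + 1), prN s (n + 1), wN s (n + 1),
        if (wN s (n + 1)).length == 4 then
          (if (dA s n).contains (wN s (n + 1)) then dA s n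
           else (dA s n).insert (wN s (n + 1)) (prN s (n + 1)))
        else dA s n) = _
    simp only [Prod.mk.injEq]
    refine ⟨trivial, trivial, trivial, ?_⟩
    by_cases h3 : 3 ≤ n
    · obtain ⟨m, rfl⟩ : ∃ m, n = m + 3 := ⟨n - 3, by omega⟩
      have e : m + 3 + 1 = m + 4 := rfl
      rw [e, wN_eq_seq4, dA_succ s (m + 3) (by omega),
        show m + 3 - 3 = m from by omega]
      simp [seq4, dstep]
    · have hn2 : n ≤ 2 := by omega
      have hlen : (wN s (n + 1)).length ≠ 4 := by rw [wN_length]; omega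
      rw [dA_succ_small s n hn2]
      simp [hlen]

theorem alt_eq_dA (s c : Int) :
    generate_sequences_and_prices_alt s c = (dA s c.toNat).items := by
  have e1 : generate_sequences_and_prices_alt s c =
      ((PySem.List.pyRange 0 c 1).foldl (fun st (_ : Int) => gstep st)
        (s, PySem.Int.mod s 10, ([] : List Int),
          (PySem.Dict.empty : PySem.Dict (List Int) Int))).2.2.2.items := rfl
  rw [e1, foldl_ignore _ gstep (fun _ _ => rfl)]
  simp only [PySem.List.length_pyRange_one, Int.sub_zero]
  rw [gstep_iterate]

-- A's prices loop
def astep (st : Int × List Int) : Int × List Int :=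
  let c := process_secret st.1
  (c, st.2 ++ [PySem.Int.mod c 10])

theorem astep_iterate (s : Int) (n : Nat) :
    astep^[n] (s, [PySem.Int.mod s 10])
      = (secN s n, (List.range (n + 1)).map (prN s)) := by
  induction n with
  | zero => simp [secN, prN]
  | succ n ih =>
    rw [Function.iterate_succ_apply', ih]
    simp [astep, List.range_succ, secN, prN]

theorem getD_map_range' {α : Type} (f : Nat → α) (m k : Nat) (d : α) (h : k < m) :
    ((List.range m).map f).getD k d = f k := by
  rw [List.getD_eq_getElem _ _ (by simpa using h)]
  simp

theorem changes_eq (s : Int) (n : Nat) :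
    (PySem.List.pyRange 1 (PySem.List.len ((List.range (n + 1)).map (prN s))) 1).map
      (fun i => PySem.List.pyGetD ((List.range (n + 1)).map (prN s)) i 0
        - PySem.List.pyGetD ((List.range (n + 1)).map (prN s)) (i - 1) 0)
      = (List.range n).map (chg s) := by
  have hlen : PySem.List.len ((List.range (n + 1)).map (prN s)) = ((n + 1 : Nat) : Int) := by
    simp [PySem.List.len_eq]
  rw [hlen, PySem.List.pyRange_one]
  have ht : ((((n + 1 : Nat) : Int)) - 1).toNat = n := by omega
  rw [ht, List.map_map]
  refine List.map_congr_left ?_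
  intro k hk
  rw [List.mem_range] at hk
  have h1 : (1 : Int) + (k : Int) = ((k + 1 : Nat) : Int) := by push_cast; ring
  simp only [Function.comp_apply, h1]
  have h2 : ((k + 1 : Nat) : Int) - 1 = ((k : Nat) : Int) := by push_cast; ring
  rw [h2]
  simp only [PySem.List.pyGetD_natCast]
  rw [getD_map_range' _ _ _ _ (by omega), getD_map_range' _ _ _ _ (by omega)]
  rfl

theorem slice_map_range (f : Nat → Int) (n k : Nat) (h : k + 4 ≤ n) :
    PySem.List.slice ((List.range n).map f) (some (k : Int)) (some ((k : Int) + 4)) =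
      [f k, f (k + 1), f (k + 2), f (k + 3)] := by
  have h4 : ((k : Int) + 4) = ((k : Int) + ((4 : Nat) : Int)) := by norm_num
  rw [h4, PySem.List.slice_natCast_add]
  apply List.ext_getElem
  · simp; omega
  · intro i h1 h2
    simp only [List.getElem_take, List.getElem_drop, List.getElem_map, List.getElem_range]
    simp at h2
    interval_cases i <;> simp

theorem a_eq_dA (s c : Int) :
    generate_sequences_and_prices s c = (dA s c.toNat).items := by
  have e1 : generate_sequences_and_prices s c =
      ((PySem.List.pyRange 0 (PySem.List.len
          ((PySem.List.pyRange 1 (PySem.List.len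
              (((PySem.List.pyRange 0 c 1).foldl (fun st (_ : Int) => astep st)
                (s, [PySem.Int.mod s 10])).2)) 1).map
            (fun i => PySem.List.pyGetD
                (((PySem.List.pyRange 0 c 1).foldl (fun st (_ : Int) => astep st)
                  (s, [PySem.Int.mod s 10])).2) i 0
              - PySem.List.pyGetD
                (((PySem.List.pyRange 0 c 1).foldl (fun st (_ : Int) => astep st)
                  (s, [PySem.Int.mod s 10])).2) (i - 1) 0)) - 3) 1).foldl
        (fun (d : PySem.Dict (List Int) Int) i =>
          if d.contains (PySem.List.slice
              ((PySem.List.pyRange 1 (PySem.List.len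
                  (((PySem.List.pyRange 0 c 1).foldl (fun st (_ : Int) => astep st)
                    (s, [PySem.Int.mod s 10])).2)) 1).map
                (fun i => PySem.List.pyGetD
                    (((PySem.List.pyRange 0 c 1).foldl (fun st (_ : Int) => astep st)
                      (s, [PySem.Int.mod s 10])).2) i 0
                  - PySem.List.pyGetD
                    (((PySem.List.pyRange 0 c 1).foldl (fun st (_ : Int) => astep st)
                      (s, [PySem.Int.mod s 10])).2) (i - 1) 0)) (some i) (some (i + 4))) then d
          else d.insert (PySem.List.slice
              ((PySem.List.pyRange 1 (PySem.List.len
                  (((PySem.List.pyRange 0 c 1).foldl (fun st (_ : Int) => astep st)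
                    (s, [PySem.Int.mod s 10])).2)) 1).map
                (fun i => PySem.List.pyGetD
                    (((PySem.List.pyRange 0 c 1).foldl (fun st (_ : Int) => astep st)
                      (s, [PySem.Int.mod s 10])).2) i 0
                  - PySem.List.pyGetD
                    (((PySem.List.pyRange 0 c 1).foldl (fun st (_ : Int) => astep st)
                      (s, [PySem.Int.mod s 10])).2) (i - 1) 0)) (some i) (some (i + 4)))
            (PySem.List.pyGetD
              (((PySem.List.pyRange 0 c 1).foldl (fun st (_ : Int) => astep st)
                (s, [PySem.Int.mod s 10])).2) (i + 4) 0))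
        PySem.Dict.empty).items := rfl
  rw [e1, foldl_ignore _ astep (fun _ _ => rfl)]
  simp only [PySem.List.length_pyRange_one, Int.sub_zero]
  rw [astep_iterate]
  simp only []
  rw [changes_eq]
  congr 1
  have hlen : PySem.List.len ((List.range c.toNat).map (chg s)) = ((c.toNat : Nat) : Int) := by
    simp [PySem.List.len_eq]
  rw [hlen, PySem.List.pyRange_one]
  have ht : (((c.toNat : Nat) : Int) - 3 - 0).toNat = c.toNat - 3 := by omega
  rw [ht, List.foldl_map]
  unfold dA
  apply PySem.List.foldl_congr_mem
  intro d k hk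
  rw [List.mem_range] at hk
  have hk4 : k + 4 ≤ c.toNat := by omega
  have h0 : (0 : Int) + (k : Int) = (k : Int) := by ring
  rw [h0, slice_map_range (chg s) _ _ hk4]
  have h2 : ((k : Int) + 4) = ((k + 4 : Nat) : Int) := by push_cast; ring
  rw [h2, PySem.List.pyGetD_natCast, getD_map_range' _ _ _ _ (by omega)]
  rfl

-- ===== VERDICT (by name: the statement is the Claim_ definition above) =====
theorem generate_sequences_and_prices_spec : Claim_equal_generate_sequences_and_prices := by
  intro s c _
  unfold Spec_generate_sequences_and_prices
  rw [a_eq_dA, alt_eq_dA]
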